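-- pv_equiv track=rewrite | github.com/nigirimeshi3510/R2_ctrl | src/robocon_plum_planner/robocon_plum_planner/team_mapping.py | to_canonical_cleared_mask
-- ===== SOURCE A (Python) =====
-- RED = "red"
--
-- BLUE = "blue"
--
-- BLUE_TO_RED_CELL_ID = {
--     1: 3,
--     2: 2,
--     3: 1,
--     4: 6,
--     5: 5,
--     6: 4,
--     7: 9,
--     8: 8,
--     9: 7,
--     10: 12,
--     11: 11,
--     12: 10,
-- }
--
-- def normalize_team_color(team_color: str) -> str:
--     value = team_color.strip().lower()
--     if value not in {RED, BLUE}: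
--         raise ValueError(f"team_color must be 'red' or 'blue', got: {team_color}")
--     return value
--
-- def to_canonical_cleared_mask(cleared_mask: int, team_color: str) -> int:
--     team = normalize_team_color(team_color)
--     if team == RED:
--         return int(cleared_mask)
--
--     out = 0
--     for local_cell in range(1, 13):
--         local_bit = 1 << (local_cell - 1)
--         if int(cleared_mask) & local_bit:
--             canonical_cell = BLUE_TO_RED_CELL_ID[local_cell]
--             out |= 1 << (canonical_cell - 1)
--     return out
-- ===== SOURCE B (Python) =====
-- RED = "red"
--
-- BLUE = "blue"
--
--
-- def normalize_team_color(team_color: str) -> str: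
--     value = team_color.strip().lower()
--     if value not in {RED, BLUE}:
--         raise ValueError(f"team_color must be 'red' or 'blue', got: {team_color}")
--     return value
--
--
-- def to_canonical_cleared_mask(cleared_mask: int, team_color: str) -> int:
--     team = normalize_team_color(team_color)
--     if team == RED:
--         return int(cleared_mask)
--
--     m = int(cleared_mask) & 0xFFF
--     out = 0
--     for shift in (0, 3, 6, 9):
--         triple = (m >> shift) & 0b111
--         swapped = (triple & 0b010) | ((triple & 0b001) << 2) | ((triple & 0b100) >> 2)
--         out |= swapped << shift
--     return out
-- ===== Notes on version B (the rewrite author's own statement) =====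
-- stated objective: alternative
-- what changed: B replaces A's per-cell loop with a dictionary lookup and per-bit OR by masking the input to 12 bits and swapping the outer bits of each 3-bit group with four grouped bit-twiddling steps (shifts 0,3,6,9), removing the remap table entirely.
import Mathlib
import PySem

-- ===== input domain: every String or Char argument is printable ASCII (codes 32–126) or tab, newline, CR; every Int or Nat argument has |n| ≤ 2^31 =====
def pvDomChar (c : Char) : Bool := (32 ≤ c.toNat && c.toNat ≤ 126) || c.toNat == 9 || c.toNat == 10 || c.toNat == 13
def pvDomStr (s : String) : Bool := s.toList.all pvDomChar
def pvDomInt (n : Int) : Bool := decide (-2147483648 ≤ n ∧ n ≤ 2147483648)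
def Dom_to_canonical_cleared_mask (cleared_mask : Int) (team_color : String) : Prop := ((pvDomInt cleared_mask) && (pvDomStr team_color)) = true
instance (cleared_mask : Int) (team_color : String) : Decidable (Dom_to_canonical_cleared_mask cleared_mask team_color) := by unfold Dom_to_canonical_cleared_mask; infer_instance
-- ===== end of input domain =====

-- B replaces A's per-cell dictionary remapping loop by grouped bit manipulation: mask to 12 bits
-- and swap the outer bits of each 3-bit column group (objective: alternative; same cost class).

-- ===== PORT A =====
-- BLUE_TO_RED_CELL_ID
def pvBlueToRedCellId : PySem.Dict Int Int :=
  PySem.Dict.ofList [(1,3),(2,2),(3,1),(4,6),(5,5),(6,4),(7,9),(8,8),(9,7),(10,12),(11,11),(12,10)]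

-- normalize_team_color: `none` exactly where Python raises ValueError
def pvNormalizeTeamColor? (team_color : String) : Option String :=
  let value := PySem.Str.lower (PySem.Str.strip team_color)
  if value = "red" ∨ value = "blue" then some value else none

def to_canonical_cleared_mask (cleared_mask : Int) (team_color : String) : Int :=
  match pvNormalizeTeamColor? team_color with
  | none => 0  -- ValueError in Python; excluded by Pre_
  | some team =>
    if team = "red" then cleared_mask
    else
      (PySem.List.pyRange 1 13 1).foldl (fun out local_cell =>
        let local_bit : Int := (1 : Int) <<< (local_cell - 1).toNat
        if PySem.Int.band cleared_mask local_bit ≠ 0 then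
          -- key is always present for local_cell ∈ 1..12, so the KeyError branch is unreachable
          let canonical_cell : Int := (pvBlueToRedCellId.get? local_cell).getD 0
          PySem.Int.bor out ((1 : Int) <<< (canonical_cell - 1).toNat)
        else out) 0

-- ===== PORT B =====
def to_canonical_cleared_mask_alt (cleared_mask : Int) (team_color : String) : Int :=
  match pvNormalizeTeamColor? team_color with
  | none => 0  -- ValueError in Python; excluded by Pre_
  | some team =>
    if team = "red" then cleared_mask
    else
      let m := PySem.Int.band cleared_mask 4095
      ([0, 3, 6, 9] : List Nat).foldl (fun out (shift : Nat) =>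
        let triple := PySem.Int.band (m >>> shift) 7
        let swapped := PySem.Int.bor (PySem.Int.bor (PySem.Int.band triple 2) ((PySem.Int.band triple 1) <<< 2)) ((PySem.Int.band triple 4) >>> 2)
        PySem.Int.bor out (swapped <<< shift)) 0

-- ===== PRECONDITION & SPEC =====
-- Pre_ excludes exactly the inputs on which Python A raises ValueError (team_color not 'red'/'blue' after strip/lower)
def Pre_to_canonical_cleared_mask (cleared_mask : Int) (team_color : String) : Prop :=
  PySem.Str.lower (PySem.Str.strip team_color) = "red" ∨ PySem.Str.lower (PySem.Str.strip team_color) = "blue"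
instance (cleared_mask : Int) (team_color : String) : Decidable (Pre_to_canonical_cleared_mask cleared_mask team_color) := by unfold Pre_to_canonical_cleared_mask; infer_instance

def pvWitness_to_canonical_cleared_mask : Int × String := (2748, " Blue ")

def Spec_to_canonical_cleared_mask (cleared_mask : Int) (team_color : String) (out : Int) : Prop := out = to_canonical_cleared_mask_alt cleared_mask team_color
instance (cleared_mask : Int) (team_color : String) (out : Int) : Decidable (Spec_to_canonical_cleared_mask cleared_mask team_color out) := by unfold Spec_to_canonical_cleared_mask; infer_instance

-- ===== CLAIM (what is proved, stated in full; the proofs are below) =====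
def Claim_equal_to_canonical_cleared_mask : Prop := ∀ (cleared_mask : Int) (team_color : String), Dom_to_canonical_cleared_mask cleared_mask team_color → Pre_to_canonical_cleared_mask cleared_mask team_color → Spec_to_canonical_cleared_mask cleared_mask team_color (to_canonical_cleared_mask cleared_mask team_color)

-- ===== LEMMAS AND PROOFS =====

-- A's blue-branch fold body and B's blue-branch fold body, named (definitionally the lambdas
-- inside the two ports), and the two loops
def pvFA (x : Int) (out : Int) (local_cell : Int) : Int :=
  let local_bit : Int := (1 : Int) <<< (local_cell - 1).toNat
  if PySem.Int.band x local_bit ≠ 0 then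
    let canonical_cell : Int := (pvBlueToRedCellId.get? local_cell).getD 0
    PySem.Int.bor out ((1 : Int) <<< (canonical_cell - 1).toNat)
  else out

def pvFB (m : Int) (out : Int) (shift : Nat) : Int :=
  let triple := PySem.Int.band (m >>> shift) 7
  let swapped := PySem.Int.bor (PySem.Int.bor (PySem.Int.band triple 2) ((PySem.Int.band triple 1) <<< 2)) ((PySem.Int.band triple 4) >>> 2)
  PySem.Int.bor out (swapped <<< shift)

def pvLoopA (x : Int) : Int := (PySem.List.pyRange 1 13 1).foldl (pvFA x) 0

def pvLoopB (x : Int) : Int := ([0, 3, 6, 9] : List Nat).foldl (pvFB (PySem.Int.band x 4095)) 0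

-- Nat-side mirrors of the two loops, on n = (x % 4096).toNat
def pvGA (n : Nat) (o : Nat) (k : Nat) : Nat :=
  if n / 2^k % 2 = 1 then o ||| (1 <<< (((pvBlueToRedCellId.get? ((k:Int)+1)).getD 0 - 1).toNat)) else o

def pvGB (n : Nat) (o : Nat) (s : Nat) : Nat :=
  let t := (n >>> s) &&& 7
  let sw := (t &&& 2) ||| ((t &&& 1) <<< 2) ||| ((t &&& 4) >>> 2)
  o ||| (sw <<< s)

theorem pv_nat_and_pow (n : Nat) (k : Nat) : n &&& 2^k = n / 2^k % 2 * 2^k := by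
  rw [Nat.and_two_pow, Nat.testBit_eq_decide_div_mod_eq]
  rcases Nat.mod_two_eq_zero_or_one (n / 2^k) with h | h <;> simp [h]

-- PySem.Int.band with a single bit, as an emod difference
theorem pv_band_bit_emod (x : Int) (k : Nat) (hk : k < 12) :
    PySem.Int.band x ((2:Int)^k) = x % 2^(k+1) - x % 2^k := by
  interval_cases k <;>
  · unfold PySem.Int.band
    split_ifs with h1 h2
    · rw [show ((2:Int)^_).toNat = 2^_ from rfl, pv_nat_and_pow]; norm_num; omega
    · norm_num at *
    · rw [show ((2:Int)^_).toNat = 2^_ from rfl, Nat.and_comm, pv_nat_and_pow]; norm_num; omega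
    · norm_num at *

-- PySem.Int.band with the 12-bit mask, as emod
theorem pv_band_mask_emod (x : Int) : PySem.Int.band x 4095 = x % 4096 := by
  unfold PySem.Int.band
  split_ifs with h1 h2
  · rw [show ((4095:Int).toNat = 2^12 - 1) from rfl, Nat.and_two_pow_sub_one_eq_mod]
    norm_num; omega
  · norm_num at *
  · rw [show ((4095:Int).toNat = 2^12 - 1) from rfl, Nat.and_comm, Nat.and_two_pow_sub_one_eq_mod]
    norm_num; omega
  · norm_num at *

theorem pv_emod_pow (x : Int) (n : Nat) (hx : x % 4096 = (n:Int)) (j : Nat) (hj : j ≤ 12) :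
    x % 2^j = ((n % 2^j : Nat) : Int) := by
  have hd : (2:Int)^j ∣ 4096 := by
    have h := pow_dvd_pow (2:Int) hj
    norm_num at h; exact h
  calc x % 2^j = x % 4096 % 2^j := (Int.emod_emod_of_dvd x hd).symm
    _ = (n:Int) % 2^j := by rw [hx]
    _ = ((n % 2^j : Nat) : Int) := by push_cast; ring_nf

-- the bit test of A, translated to Nat
theorem pv_cond_iff (x : Int) (n : Nat) (hx : x % 4096 = (n:Int)) (k : Nat) (hk : k < 12) :
    (PySem.Int.band x ((2:Int)^k) ≠ 0) ↔ (n / 2^k % 2 = 1) := by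
  rw [pv_band_bit_emod x k hk, pv_emod_pow x n hx (k+1) (by omega), pv_emod_pow x n hx k (by omega)]
  have hmul : n % 2^(k+1) = n % 2^k + 2^k * (n / 2^k % 2) := by
    rw [pow_succ, Nat.mod_mul]
  rw [hmul]
  rcases Nat.mod_two_eq_zero_or_one (n / 2^k) with h | h <;> simp [h]

-- one step of A's fold equals one step of the Nat mirror
theorem pv_stepA (x : Int) (n : Nat) (hx : x % 4096 = (n:Int)) (k : Nat) (hk : k < 12) (o : Nat) :
    pvFA x ((o : Nat) : Int) ((k : Int) + 1) = ((pvGA n o k : Nat) : Int) := by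
  show (if PySem.Int.band x ((1 : Int) <<< (((k:Int) + 1 - 1)).toNat) ≠ 0 then
          PySem.Int.bor ((o:Nat):Int) ((1 : Int) <<< (((pvBlueToRedCellId.get? ((k:Int)+1)).getD 0 - 1).toNat))
        else ((o:Nat):Int)) = ((pvGA n o k : Nat) : Int)
  have h1 : ((k:Int) + 1 - 1).toNat = k := by omega
  have h2 : ((1 : Int) <<< k) = ((2:Int)^k) := by
    show (((1 <<< k : Nat) : Int)) = (2:Int)^k
    rw [Nat.one_shiftLeft]; push_cast; ring
  rw [h1, h2]
  unfold pvGA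
  by_cases hc : n / 2^k % 2 = 1
  · rw [if_pos ((pv_cond_iff x n hx k hk).mpr hc), if_pos hc]
    show PySem.Int.bor ((o:Nat):Int) (((1 <<< _ : Nat) : Int)) = _
    rw [PySem.Int.bor_natCast]
  · rw [if_neg (fun h => hc ((pv_cond_iff x n hx k hk).mp h)), if_neg hc]

-- A's fold over any list of cells, against the Nat mirror
theorem pv_bridgeA_aux (x : Int) (n : Nat) (hx : x % 4096 = (n:Int)) :
    ∀ (ks : List Nat), (∀ k ∈ ks, k < 12) → ∀ (o : Nat),
      List.foldl (pvFA x) ((o : Nat) : Int) (List.map (fun (k : Nat) => ((k : Int) + 1)) ks)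
      = ((List.foldl (pvGA n) o ks : Nat) : Int) := by
  intro ks
  induction ks with
  | nil => intro _ o; simp
  | cons k tl ih =>
    intro hmem o
    have hk : k < 12 := hmem k (by simp)
    rw [List.map_cons, List.foldl_cons, List.foldl_cons, pv_stepA x n hx k hk o]
    exact ih (fun j hj => hmem j (by simp [hj])) (pvGA n o k)

theorem pv_bridgeA (x : Int) (n : Nat) (hx : x % 4096 = (n:Int)) :
    pvLoopA x = ((List.foldl (pvGA n) 0 [0,1,2,3,4,5,6,7,8,9,10,11] : Nat) : Int) := by
  have e : PySem.List.pyRange 1 13 1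
      = List.map (fun (k : Nat) => ((k : Int) + 1)) [0,1,2,3,4,5,6,7,8,9,10,11] := by decide
  unfold pvLoopA
  rw [e]
  exact pv_bridgeA_aux x n hx [0,1,2,3,4,5,6,7,8,9,10,11] (by decide) 0

-- one step of B's fold equals one step of the Nat mirror
theorem pv_stepB (n : Nat) (s : Nat) (o : Nat) :
    pvFB ((n : Nat) : Int) ((o : Nat) : Int) s = ((pvGB n o s : Nat) : Int) := by
  show PySem.Int.bor ((o:Nat):Int) _ = _
  unfold pvGB
  have ht : PySem.Int.band (((n:Nat):Int) >>> s) 7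
      = ((((n >>> s) &&& 7 : Nat)) : Int) := by
    show PySem.Int.band (((n >>> s : Nat)):Int) (((7:Nat):Int)) = _
    rw [PySem.Int.band_natCast]
  rw [ht]
  rw [show PySem.Int.band ((((n >>> s) &&& 7 : Nat)):Int) 2 = ((((n >>> s) &&& 7) &&& 2 : Nat) : Int) from PySem.Int.band_natCast _ _,
      show PySem.Int.band ((((n >>> s) &&& 7 : Nat)):Int) 1 = ((((n >>> s) &&& 7) &&& 1 : Nat) : Int) from PySem.Int.band_natCast _ _,
      show PySem.Int.band ((((n >>> s) &&& 7 : Nat)):Int) 4 = ((((n >>> s) &&& 7) &&& 4 : Nat) : Int) from PySem.Int.band_natCast _ _]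
  rw [show (((((n >>> s) &&& 7) &&& 1 : Nat) : Int) <<< 2) = (((((n >>> s) &&& 7) &&& 1) <<< 2 : Nat) : Int) from rfl,
      show (((((n >>> s) &&& 7) &&& 4 : Nat) : Int) >>> 2) = (((((n >>> s) &&& 7) &&& 4) >>> 2 : Nat) : Int) from rfl]
  rw [PySem.Int.bor_natCast, PySem.Int.bor_natCast]
  rw [show ((((((n >>> s) &&& 7) &&& 2) ||| ((((n >>> s) &&& 7) &&& 1) <<< 2) ||| ((((n >>> s) &&& 7) &&& 4) >>> 2) : Nat)) : Int) <<< s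
      = ((((((n >>> s) &&& 7) &&& 2) ||| ((((n >>> s) &&& 7) &&& 1) <<< 2) ||| ((((n >>> s) &&& 7) &&& 4) >>> 2)) <<< s : Nat) : Int) from rfl]
  rw [PySem.Int.bor_natCast]

theorem pv_bridgeB (x : Int) (n : Nat) (hx : x % 4096 = (n:Int)) :
    pvLoopB x = ((List.foldl (pvGB n) 0 [0,3,6,9] : Nat) : Int) := by
  unfold pvLoopB
  rw [pv_band_mask_emod, hx]
  rw [List.foldl_cons, List.foldl_cons, List.foldl_cons, List.foldl_cons,
      List.foldl_nil, List.foldl_cons, List.foldl_cons, List.foldl_cons, List.foldl_cons,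
      List.foldl_nil]
  rw [show ((0:Int) = ((0:Nat):Int)) from rfl]
  rw [pv_stepB n 0 0, pv_stepB n 3 _, pv_stepB n 6 _, pv_stepB n 9 _]

set_option maxRecDepth 2048 in
theorem pv_keyN : ∀ (a : Fin 64) (b : Fin 64),
    List.foldl (pvGA (a.val * 64 + b.val)) 0 [0,1,2,3,4,5,6,7,8,9,10,11]
      = List.foldl (pvGB (a.val * 64 + b.val)) 0 [0,3,6,9] := by
  decide

theorem pv_blue_eq (x : Int) : pvLoopA x = pvLoopB x := by
  have h0 : 0 ≤ x % 4096 := Int.emod_nonneg x (by norm_num)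
  have h1 : x % 4096 < 4096 := Int.emod_lt_of_pos x (by norm_num)
  have hx : x % 4096 = (((x % 4096).toNat : Nat) : Int) := (Int.toNat_of_nonneg h0).symm
  set n : Nat := (x % 4096).toNat with hn
  have hlt : n < 4096 := by omega
  rw [pv_bridgeA x _ hx, pv_bridgeB x _ hx]
  have hkey := pv_keyN ⟨n / 64, by omega⟩ ⟨n % 64, by omega⟩
  rw [show n / 64 * 64 + n % 64 = n from by omega] at hkey
  rw [hkey]

-- ===== VERDICT (by name: the statement is the Claim_ definition above) =====
theorem to_canonical_cleared_mask_spec : Claim_equal_to_canonical_cleared_mask := by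
  intro cleared_mask team_color _hdom hpre
  unfold Spec_to_canonical_cleared_mask
  show to_canonical_cleared_mask cleared_mask team_color = to_canonical_cleared_mask_alt cleared_mask team_color
  unfold Pre_to_canonical_cleared_mask at hpre
  rcases hpre with h | h <;>
    simp only [to_canonical_cleared_mask, to_canonical_cleared_mask_alt, pvNormalizeTeamColor?, h, true_or, or_true, if_true]
  have hne : ("blue" : String) ≠ "red" := by decide
  rw [if_neg hne, if_neg hne]
  exact pv_blue_eq cleared_mask
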